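-- pv_equiv track=rewrite | github.com/AetherKhronus/word-game-solver | Word Game Solver_1.py | valid_input_letters
-- ===== SOURCE A (Python) =====
-- def valid_input_letters(inp):
--
--     if (len(inp) < 1):
--
--         return False
--
--     for i in inp:
--
--         if ((not (i.isalpha())) and (not (i == ','))):
--
--             return False
--
--     if (inp[-1] == ','):
--
--         return False
--
--     for i in inp.split(","):
--
--         if (len(i) != 1):
--
--             return False
--
--     return True
-- ===== SOURCE B (Python) =====
-- def valid_input_letters(inp):
--     return all(len(t) == 1 and t.isalpha() for t in inp.split(','))
-- ===== Notes on version B (the rewrite author's own statement) =====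
-- stated objective: simpler
-- what changed: B replaces A's four separate checks (empty guard, char-by-char alpha/comma scan, trailing-comma test, token-length scan) with one short-circuiting pass testing each comma-split token for being a single alphabetic character.
import Mathlib
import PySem

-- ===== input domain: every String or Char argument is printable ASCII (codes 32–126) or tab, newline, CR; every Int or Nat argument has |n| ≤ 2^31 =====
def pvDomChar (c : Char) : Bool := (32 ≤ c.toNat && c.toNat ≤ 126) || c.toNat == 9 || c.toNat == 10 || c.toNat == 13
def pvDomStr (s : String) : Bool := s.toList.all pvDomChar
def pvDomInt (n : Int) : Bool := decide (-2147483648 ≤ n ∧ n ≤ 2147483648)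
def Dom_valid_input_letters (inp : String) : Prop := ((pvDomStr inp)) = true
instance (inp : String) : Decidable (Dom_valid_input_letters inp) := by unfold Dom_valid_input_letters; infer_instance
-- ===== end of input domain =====

-- B replaces A's four separate checks (empty guard, char scan, trailing-comma test,
-- token-length scan) with one per-token test over the comma-split tokens (simpler).

-- ===== PORT A =====
def valid_input_letters (inp : String) : Bool :=
  if inp.toList.length < 1 then false
  else if ¬ (inp.toList.all (fun i => PySem.Chars.isalpha i || i == ',')) then false
  else if PySem.List.pyGet? inp.toList (-1) = some ',' then false
  else if ¬ ((PySem.Chars.splitOn inp.toList [',']).all (fun i => i.length == 1)) then false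
  else true

-- ===== PORT B =====
def valid_input_letters_alt (inp : String) : Bool :=
  (PySem.Chars.splitOn inp.toList [',']).all
    (fun t => t.length == 1 && PySem.Chars.strIsalpha t)

-- ===== PRECONDITION & SPEC =====
def Spec_valid_input_letters (inp : String) (out : Bool) : Prop := out = valid_input_letters_alt inp
instance (inp : String) (out : Bool) : Decidable (Spec_valid_input_letters inp out) := by unfold Spec_valid_input_letters; infer_instance

-- ===== CLAIM (what is proved, stated in full; the proofs are below) =====
def Claim_equal_valid_input_letters : Prop := ∀ (inp : String), Dom_valid_input_letters inp → Spec_valid_input_letters inp (valid_input_letters inp)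

-- ===== LEMMAS AND PROOFS =====

/-- Simple structural recursion computing `cs.split(",")` for the single-char separator. -/
def splitComma : List Char → List (List Char)
  | [] => [[]]
  | c :: rest =>
      if c = ',' then [] :: splitComma rest
      else (c :: (splitComma rest).headI) :: (splitComma rest).tail

theorem headI_cons_tail {α : Type} [Inhabited α] (l : List α) (h : l ≠ []) : l.headI :: l.tail = l := by
  cases l with
  | nil => exact absurd rfl h
  | cons a t => rfl

theorem splitComma_ne_nil (cs : List Char) : splitComma cs ≠ [] := by
  cases cs with
  | nil => simp [splitComma]
  | cons c rest => simp [splitComma]; split_ifs <;> simp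

theorem splitComma_cons_comma (rest : List Char) :
    splitComma (',' :: rest) = [] :: splitComma rest := by
  simp [splitComma]

theorem splitComma_cons_ne (c : Char) (rest : List Char) (h : c ≠ ',') :
    splitComma (c :: rest) = (c :: (splitComma rest).headI) :: (splitComma rest).tail := by
  simp [splitComma, h]

/-- `splitOn.go` with separator `[',']` in terms of `splitComma`. -/
theorem splitOn_go_eq (l : List Char) : ∀ (fuel : ℕ) (cur : List Char) (acc : List (List Char)),
    l.length ≤ fuel →
    PySem.Chars.splitOn.go [','] fuel l cur acc
      = acc.reverse ++ (cur.reverse ++ (splitComma l).headI) :: (splitComma l).tail := by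
  induction l with
  | nil =>
      intro fuel cur acc _
      cases fuel <;> simp [PySem.Chars.splitOn.go, splitComma]
  | cons c rest ih =>
      intro fuel cur acc hf
      cases fuel with
      | zero => simp at hf
      | succ f =>
          by_cases hc : c = ','
          · subst hc
            rw [show PySem.Chars.splitOn.go [','] (f+1) (',' :: rest) cur acc
                  = PySem.Chars.splitOn.go [','] f rest [] (cur.reverse :: acc) by
                simp [PySem.Chars.splitOn.go, List.isPrefixOf]]
            rw [ih f [] (cur.reverse :: acc) (by simpa using hf)]
            rw [splitComma_cons_comma]
            simp
            exact headI_cons_tail _ (splitComma_ne_nil rest)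
          · rw [show PySem.Chars.splitOn.go [','] (f+1) (c :: rest) cur acc
                  = PySem.Chars.splitOn.go [','] f rest (c :: cur) acc by
                simp [PySem.Chars.splitOn.go, List.isPrefixOf]
                intro h; exact absurd h.symm hc]
            rw [ih f (c :: cur) acc (by simpa using Nat.lt_succ_iff.mp (by simpa using hf))]
            rw [splitComma_cons_ne c rest hc]
            simp

theorem splitOn_eq_splitComma (cs : List Char) :
    PySem.Chars.splitOn cs [','] = splitComma cs := by
  rw [PySem.Chars.splitOn, splitOn_go_eq cs (cs.length + 1) [] [] (by omega)]
  obtain ⟨t, ts, h⟩ := List.exists_cons_of_ne_nil (splitComma_ne_nil cs)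
  simp [h]

/-- Every character of a token comes from `cs` and is not a comma. -/
theorem mem_token (cs : List Char) : ∀ t ∈ splitComma cs, ∀ c ∈ t, c ∈ cs ∧ c ≠ ',' := by
  induction cs with
  | nil => intro t ht c hc; simp [splitComma] at ht; simp [ht] at hc
  | cons a rest ih =>
      intro t ht c hc
      by_cases ha : a = ','
      · subst ha
        rw [splitComma_cons_comma] at ht
        rcases List.mem_cons.mp ht with ht | ht
        · simp [ht] at hc
        · have := ih t ht c hc; exact ⟨by simp [this.1], this.2⟩
      · rw [splitComma_cons_ne a rest ha] at ht
        obtain ⟨t0, ts, h⟩ := List.exists_cons_of_ne_nil (splitComma_ne_nil rest)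
        rw [h] at ht
        simp at ht
        rcases ht with ht | ht
        · subst ht
          rcases List.mem_cons.mp hc with hc | hc
          · subst hc; exact ⟨List.mem_cons_self, ha⟩
          · have := ih t0 (by simp [h]) c hc
            exact ⟨by simp [this.1], this.2⟩
        · have := ih t (by simp [h, ht]) c hc
          exact ⟨by simp [this.1], this.2⟩

/-- Every non-comma character of `cs` lies in some token. -/
theorem token_cover (cs : List Char) :
    ∀ c ∈ cs, c ≠ ',' → ∃ t ∈ splitComma cs, c ∈ t := by
  induction cs with
  | nil => simp
  | cons a rest ih =>
      intro c hc hne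
      by_cases ha : a = ','
      · subst ha
        rcases List.mem_cons.mp hc with hc | hc
        · exact absurd hc hne
        · obtain ⟨t, ht, hct⟩ := ih c hc hne
          exact ⟨t, by rw [splitComma_cons_comma]; simp [ht], hct⟩
      · rw [splitComma_cons_ne a rest ha]
        obtain ⟨t0, ts, h⟩ := List.exists_cons_of_ne_nil (splitComma_ne_nil rest)
        rw [h]
        rcases List.mem_cons.mp hc with hc | hc
        · subst hc; exact ⟨c :: t0, by simp, by simp⟩
        · obtain ⟨t, ht, hct⟩ := ih c hc hne
          rw [h] at ht
          rcases List.mem_cons.mp ht with ht | ht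
          · exact ⟨a :: t0, by simp, by simp [← ht, hct]⟩
          · exact ⟨t, by simp [ht], hct⟩

/-- A trailing comma produces an empty final token. -/
theorem splitComma_append_comma (cs : List Char) :
    splitComma (cs ++ [',']) = splitComma cs ++ [[]] := by
  induction cs with
  | nil => simp [splitComma]
  | cons a rest ih =>
      by_cases ha : a = ','
      · subst ha
        rw [List.cons_append, splitComma_cons_comma, splitComma_cons_comma, ih]
        simp
      · rw [List.cons_append, splitComma_cons_ne a _ ha, splitComma_cons_ne a rest ha, ih]
        obtain ⟨t0, ts, h⟩ := List.exists_cons_of_ne_nil (splitComma_ne_nil rest)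
        simp [h]

theorem pyGet_neg_one (cs : List Char) (h : cs ≠ []) :
    PySem.List.pyGet? cs (-1) = cs.getLast? := by
  have hl : 0 < cs.length := List.length_pos_iff.mpr h
  rw [List.getLast?_eq_getElem?]
  simp [PySem.List.pyGet?, PySem.List.pyIdx?]
  rw [if_pos (by omega)]
  simp

/-- The core equivalence, stated over the token characterisation. -/
theorem core (cs : List Char) :
    ((¬ cs.length < 1) ∧ (cs.all (fun i => PySem.Chars.isalpha i || i == ',')) = true
      ∧ ¬ PySem.List.pyGet? cs (-1) = some ','
      ∧ ((splitComma cs).all (fun i => i.length == 1)) = true)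
    ↔ ((splitComma cs).all (fun t => t.length == 1 && PySem.Chars.strIsalpha t)) = true := by
  constructor
  · rintro ⟨-, hall, -, hlen⟩
    rw [List.all_eq_true] at hall hlen ⊢
    intro t ht
    have hlen1 : t.length = 1 := by simpa using hlen t ht
    obtain ⟨c, hc⟩ := List.length_eq_one_iff.mp hlen1
    subst hc
    have hmem := mem_token cs _ ht c (by simp)
    have halpha := by simpa [hmem.2] using hall c hmem.1
    simp [PySem.Chars.strIsalpha, halpha]
  · intro hB
    rw [List.all_eq_true] at hB
    have hne : cs ≠ [] := by
      rintro rfl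
      simpa using hB [] (by simp [splitComma])
    refine ⟨by have := List.length_pos_iff.mpr hne; omega, ?_, ?_, ?_⟩
    · rw [List.all_eq_true]
      intro c hc
      by_cases hcomma : c = ','
      · simp [hcomma]
      · obtain ⟨t, ht, hct⟩ := token_cover cs c hc hcomma
        have := hB t ht
        simp only [Bool.and_eq_true, beq_iff_eq] at this
        obtain ⟨d, hd⟩ := List.length_eq_one_iff.mp this.1
        rw [hd] at hct
        have halpha : PySem.Chars.isalpha d = true := by
          simpa [PySem.Chars.strIsalpha, hd] using this.2
        simp at hct
        simp [hct, halpha]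
    · rw [pyGet_neg_one cs hne]
      intro hlast
      obtain ⟨cs', rfl⟩ : ∃ cs', cs = cs' ++ [','] := by
        refine ⟨cs.dropLast, ?_⟩
        have hdg := List.dropLast_append_getLast hne
        rw [List.getLast?_eq_some_getLast hne] at hlast
        simp only [Option.some_inj] at hlast
        rw [hlast] at hdg
        exact hdg.symm
      have hmem0 : ([] : List Char) ∈ splitComma (cs' ++ [',']) := by
        rw [splitComma_append_comma]; simp
      simpa using hB [] hmem0
    · rw [List.all_eq_true]
      intro t ht
      have h' := hB t ht
      rw [Bool.and_eq_true] at h'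
      simpa using h'.1

-- ===== VERDICT (by name: the statement is the Claim_ definition above) =====
theorem valid_input_letters_spec : Claim_equal_valid_input_letters := by
  intro inp _
  unfold Spec_valid_input_letters valid_input_letters valid_input_letters_alt
  rw [splitOn_eq_splitComma]
  rw [Bool.eq_iff_iff]
  constructor
  · intro hA
    split_ifs at hA with h1 h2 h3 h4
    · exact ((core inp.toList).mp ⟨h1, h2, h3, h4⟩)
  · intro hB
    have hc := (core inp.toList).mpr hB
    split_ifs with h1 h2 h3 h4 <;> first
      | rfl
      | exact absurd h1 hc.1
      | exact absurd hc.2.1 h2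
      | exact absurd h2 (fun hh => hh hc.2.1)
      | exact absurd h3 hc.2.2.1
      | exact absurd hc.2.2.2 h4
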